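-- pv_equiv track=rewrite | github.com/wwiens/wheel_of_fortune | server.py | checkpuzzlereset
-- ===== SOURCE A (Python) =====
-- def checkpuzzlereset(letterlist):
--     # This function resets the puzzle
--     # It does this by checking the number of letters and blanks - if there are more than 7 letters and no blanks
--     # we assume a completed puzzle and reset
--     blanks = 0
--     letters = 0
--     tiles = 0
--     for x in letterlist:
--         if x == "#":
--             blanks += 1
--         elif x == "_":
--             tiles += 1
--         else:
--             letters += 1
--
--     if letters > 7 and blanks == 0:
--         return True
--     else:
--         return False
-- ===== SOURCE B (Python) =====
-- def checkpuzzlereset(letterlist):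
--     # Reset iff no blanks ('#') present and more than 7 non-tile ('_') entries.
--     if "#" in letterlist:
--         return False
--     return sum(1 for x in letterlist if x != "_") > 7
-- ===== Notes on version B (the rewrite author's own statement) =====
-- stated objective: simpler
-- what changed: Replaces the three-counter accumulation loop with a short-circuiting membership guard for '#' followed by a single filtered count of non-'_' entries; the tile tally is dropped as irrelevant.
import Mathlib
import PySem

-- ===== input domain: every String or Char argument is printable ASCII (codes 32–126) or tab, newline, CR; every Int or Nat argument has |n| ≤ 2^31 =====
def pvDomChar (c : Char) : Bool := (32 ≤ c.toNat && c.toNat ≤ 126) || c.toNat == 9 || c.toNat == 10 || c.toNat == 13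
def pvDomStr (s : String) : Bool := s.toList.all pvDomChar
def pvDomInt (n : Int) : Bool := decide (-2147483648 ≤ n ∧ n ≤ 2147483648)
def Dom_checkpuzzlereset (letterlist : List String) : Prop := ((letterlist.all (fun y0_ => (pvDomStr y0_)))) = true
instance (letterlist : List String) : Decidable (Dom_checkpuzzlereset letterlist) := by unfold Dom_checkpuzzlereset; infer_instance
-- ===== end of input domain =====

-- B replaces A's three-counter loop with a membership guard plus one filtered count (objective: simpler).

-- ===== PORT A =====
-- state: (blanks, letters, tiles), exactly A's loop
def checkpuzzlereset (letterlist : List String) : Bool :=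
  let s := letterlist.foldl
    (fun (st : Int × Int × Int) x =>
      if x = "#" then (st.1 + 1, st.2.1, st.2.2)
      else if x = "_" then (st.1, st.2.1, st.2.2 + 1)
      else (st.1, st.2.1 + 1, st.2.2))
    (0, 0, 0)
  if s.2.1 > 7 ∧ s.1 = 0 then true else false

-- ===== PORT B =====
def checkpuzzlereset_alt (letterlist : List String) : Bool :=
  if letterlist.contains "#" then false
  else decide ((letterlist.countP (fun x => x ≠ "_") : Int) > 7)

-- ===== PRECONDITION & SPEC =====
def Spec_checkpuzzlereset (letterlist : List String) (out : Bool) : Prop := out = checkpuzzlereset_alt letterlist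
instance (letterlist : List String) (out : Bool) : Decidable (Spec_checkpuzzlereset letterlist out) := by unfold Spec_checkpuzzlereset; infer_instance

-- ===== CLAIM (what is proved, stated in full; the proofs are below) =====
def Claim_equal_checkpuzzlereset : Prop := ∀ (letterlist : List String), Dom_checkpuzzlereset letterlist → Spec_checkpuzzlereset letterlist (checkpuzzlereset letterlist)

-- ===== LEMMAS AND PROOFS =====
-- Loop invariant: A's fold, started from accumulator (b, l, t), lands at
-- (b + #blanks, l + #non-tile-non-blank entries, t + #tiles).
theorem checkpuzzlereset_fold_char (letterlist : List String) (b l t : Int) :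
    letterlist.foldl
      (fun (st : Int × Int × Int) x =>
        if x = "#" then (st.1 + 1, st.2.1, st.2.2)
        else if x = "_" then (st.1, st.2.1, st.2.2 + 1)
        else (st.1, st.2.1 + 1, st.2.2))
      (b, l, t)
    = (b + letterlist.countP (fun x => decide (x = "#")),
       l + letterlist.countP (fun x => decide (x ≠ "#" ∧ x ≠ "_")),
       t + letterlist.countP (fun x => decide (x = "_"))) := by
  induction letterlist generalizing b l t with
  | nil => simp
  | cons y ys ih =>
    by_cases hy : y = "#"
    · simp [hy, ih, Prod.ext_iff]; omega
    · by_cases hy2 : y = "_"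
      · simp [hy2, ih, Prod.ext_iff]; omega
      · simp [hy, hy2, ih, Prod.ext_iff]; omega

theorem countP_hash_pos (l : List String) (h : "#" ∈ l) :
    0 < l.countP (fun x => decide (x = "#")) := by
  induction l with
  | nil => cases h
  | cons y ys ih =>
    rw [List.countP_cons]
    rcases List.mem_cons.mp h with h1 | h2
    · simp [← h1]
    · have := ih h2; omega

theorem countP_hash_zero (l : List String) (h : "#" ∉ l) :
    l.countP (fun x => decide (x = "#")) = 0 := by
  induction l with
  | nil => rfl
  | cons y ys ih =>
    simp only [List.mem_cons, not_or] at h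
    have hy : y ≠ "#" := fun e => h.1 e.symm
    rw [List.countP_cons]
    simp [hy, ih h.2]

theorem countP_ne_congr (l : List String) (h : "#" ∉ l) :
    l.countP (fun x => decide (x ≠ "#" ∧ x ≠ "_")) = l.countP (fun x => decide (x ≠ "_")) := by
  induction l with
  | nil => rfl
  | cons y ys ih =>
    simp only [List.mem_cons, not_or] at h
    have hy : y ≠ "#" := fun e => h.1 e.symm
    rw [List.countP_cons, List.countP_cons, ih h.2]
    simp [hy]

theorem checkpuzzlereset_eq (letterlist : List String) :
    checkpuzzlereset letterlist = checkpuzzlereset_alt letterlist := by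
  unfold checkpuzzlereset checkpuzzlereset_alt
  rw [checkpuzzlereset_fold_char]
  simp only [zero_add]
  by_cases hmem : "#" ∈ letterlist
  · have hpos := countP_hash_pos letterlist hmem
    simp [hmem]
  · rw [countP_hash_zero letterlist hmem, countP_ne_congr letterlist hmem]
    simp [hmem]

-- ===== VERDICT (by name: the statement is the Claim_ definition above) =====
theorem checkpuzzlereset_spec : Claim_equal_checkpuzzlereset := by
  intro letterlist _
  exact checkpuzzlereset_eq letterlist
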